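-- pv_equiv track=rewrite | github.com/terencefan/inority-workspace | skills/runbook/scripts/commands/normalize.py | section_slice
-- ===== SOURCE A (Python) =====
-- def section_slice(
--     sections: list[tuple[int, str]], title: str, lines_len: int
-- ) -> tuple[int, int] | None:
--     for i, (start, name) in enumerate(sections):
--         if name == title:
--             end = sections[i + 1][0] if i + 1 < len(sections) else lines_len
--             return start, end
--     return None
-- ===== SOURCE B (Python) =====
-- def section_slice(
--     sections: list[tuple[int, str]], title: str, lines_len: int
-- ) -> tuple[int, int] | None:
--     # Index-then-lookup: each section's end is the next section's start
--     # (lines_len for the last); first occurrence of a name wins.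
--     ends = [start for start, _ in sections[1:]] + [lines_len]
--     table = {}
--     for (start, name), end in zip(sections, ends):
--         if name not in table:
--             table[name] = (start, end)
--     return table.get(title)
-- ===== Notes on version B (the rewrite author's own statement) =====
-- stated objective: alternative
-- what changed: Replaces the indexed scan-with-lookahead (sections[i+1] inside the loop) by an index-then-lookup decomposition: zip each section with its successor's start (lines_len for the last), build a first-occurrence-wins dict, and answer with a single dict lookup.
import Mathlib
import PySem

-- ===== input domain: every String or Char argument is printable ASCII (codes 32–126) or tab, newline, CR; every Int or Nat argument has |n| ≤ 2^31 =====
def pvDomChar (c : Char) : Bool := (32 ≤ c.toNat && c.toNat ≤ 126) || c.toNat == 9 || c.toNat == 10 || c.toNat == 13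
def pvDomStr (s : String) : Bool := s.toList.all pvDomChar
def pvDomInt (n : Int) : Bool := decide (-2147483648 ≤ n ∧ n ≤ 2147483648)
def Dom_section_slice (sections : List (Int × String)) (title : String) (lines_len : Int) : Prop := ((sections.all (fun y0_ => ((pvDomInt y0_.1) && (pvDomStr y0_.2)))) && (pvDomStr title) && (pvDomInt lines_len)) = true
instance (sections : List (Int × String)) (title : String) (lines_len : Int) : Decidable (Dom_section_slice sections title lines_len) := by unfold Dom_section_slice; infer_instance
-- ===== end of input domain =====

-- B builds the whole name → (start, end) table first and answers with one lookup;
-- A scans for the title and peeks at sections[i+1] inside the loop. Alternative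
-- decomposition, same cost; return values proved equal on the whole domain.

-- ===== PORT A =====
-- loop 'for i, (start, name) in enumerate(sections)' as structural recursion
-- carrying the index i; 'sections[i+1][0] if i + 1 < len(sections) else lines_len'
-- is exact as a match on sections[i+1]? since i + 1 ≥ 0 never wraps.
def sectionSliceLoopA (full : List (Int × String)) (title : String) (lines_len : Int) :
    Nat → List (Int × String) → Option (Int × Int)
  | _, [] => none
  | i, (start, name) :: rest =>
      if name == title then
        some (start, match full[i + 1]? with
          | some p => p.1
          | none => lines_len)
      else sectionSliceLoopA full title lines_len (i + 1) rest

def section_slice (sections : List (Int × String)) (title : String) (lines_len : Int) : Option (Int × Int) :=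
  sectionSliceLoopA sections title lines_len 0 sections

-- ===== PORT B =====
-- 'sections[1:]' is exactly '.drop 1' (nonnegative start); 'name not in table'
-- is '¬ contains'; 'table.get(title)' is Dict.get?.
def section_slice_alt (sections : List (Int × String)) (title : String) (lines_len : Int) : Option (Int × Int) :=
  let ends : List Int := (sections.drop 1).map (·.1) ++ [lines_len]
  let table : PySem.Dict String (Int × Int) :=
    (sections.zip ends).foldl
      (fun d p => if d.contains p.1.2 then d else d.insert p.1.2 (p.1.1, p.2))
      PySem.Dict.empty
  table.get? title

-- ===== PRECONDITION & SPEC =====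
def Spec_section_slice (sections : List (Int × String)) (title : String) (lines_len : Int) (out : Option (Int × Int)) : Prop := out = section_slice_alt sections title lines_len
instance (sections : List (Int × String)) (title : String) (lines_len : Int) (out : Option (Int × Int)) : Decidable (Spec_section_slice sections title lines_len out) := by unfold Spec_section_slice; infer_instance

-- ===== CLAIM (what is proved, stated in full; the proofs are below) =====
def Claim_equal_section_slice : Prop := ∀ (sections : List (Int × String)) (title : String) (lines_len : Int), Dom_section_slice sections title lines_len → Spec_section_slice sections title lines_len (section_slice sections title lines_len)

-- ===== LEMMAS AND PROOFS =====

-- common reading of both programs: first pair whose name matches, with its end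
def scanPairs (title : String) : List ((Int × String) × Int) → Option (Int × Int)
  | [] => none
  | ((s, n), e) :: rest => if n = title then some (s, e) else scanPairs title rest

theorem foldB_get? (title : String) :
    ∀ (ps : List ((Int × String) × Int)) (d : PySem.Dict String (Int × Int)),
      (ps.foldl (fun d p => if d.contains p.1.2 then d else d.insert p.1.2 (p.1.1, p.2)) d).get? title
        = ((d.get? title).or (scanPairs title ps)) := by
  intro ps
  induction ps with
  | nil => intro d; simp [scanPairs]
  | cons p rest ih =>
    intro d
    obtain ⟨⟨s, n⟩, e⟩ := p
    simp only [List.foldl_cons, scanPairs]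
    by_cases hc : d.contains n = true
    · rw [if_pos hc, ih]
      have hs : (d.get? n).isSome = true := by
        rw [← PySem.Dict.contains_eq_isSome_get?]; exact hc
      cases hn : d.get? n with
      | none => simp [hn] at hs
      | some v =>
        by_cases ht : n = title
        · subst ht; simp [hn]
        · simp [ht]
    · rw [if_neg hc, ih]
      have hs : d.get? n = none := by
        have := PySem.Dict.contains_eq_isSome_get? (d := d) (k := n)
        rw [this] at hc
        simpa using hc
      by_cases ht : n = title
      · subst ht
        rw [PySem.Dict.get?_insert_self]
        simp [hs]
      · rw [PySem.Dict.get?_insert_of_ne _ _ (fun h => ht h.symm)]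
        simp [ht]

theorem loopA_eq_scan (title : String) (lines_len : Int) (full : List (Int × String)) :
    ∀ (rest : List (Int × String)) (k : Nat), full.drop k = rest →
      sectionSliceLoopA full title lines_len k rest
        = scanPairs title (rest.zip ((rest.drop 1).map (·.1) ++ [lines_len])) := by
  intro rest
  induction rest with
  | nil => intro k _; simp [sectionSliceLoopA, scanPairs]
  | cons p rest' ih =>
    intro k hk
    obtain ⟨s, n⟩ := p
    have hnext : full[k + 1]? = rest'.head? := by
      have h1 : (full.drop k)[1]? = full[k + 1]? := by
        rw [List.getElem?_drop]
      rw [← h1, hk]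
      cases rest' <;> rfl
    have hdrop : full.drop (k + 1) = rest' := by
      rw [← List.tail_drop, hk]
      rfl
    simp only [sectionSliceLoopA, hnext]
    by_cases ht : n = title
    · subst ht
      cases rest' with
      | nil => simp [scanPairs]
      | cons q rest'' => simp [scanPairs]
    · have hbeq : (n == title) = false := by simp [ht]
      rw [hbeq]
      simp only [Bool.false_eq_true, if_false]
      rw [ih (k + 1) hdrop]
      cases rest' with
      | nil => simp [scanPairs, ht]
      | cons q rest'' =>
        obtain ⟨s2, n2⟩ := q
        simp [scanPairs, ht]

-- ===== VERDICT (by name: the statement is the Claim_ definition above) =====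
theorem section_slice_spec : Claim_equal_section_slice := by
  intro sections title lines_len _
  unfold Spec_section_slice section_slice section_slice_alt
  rw [loopA_eq_scan title lines_len sections sections 0 (by simp)]
  rw [foldB_get?]
  simp
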